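-- pv_equiv track=rewrite | github.com/inhyebaik/ctci | ctci/ix_interview_questions/data_structures/ch5_bit_manipulation/3_flip.py | flip_bit_to_win
-- ===== SOURCE A (Python) =====
-- def flip_bit_to_win(n):
--
--     prev_run = 0
--     curr_run = 0
--     curr_max = 1
--
--     while n:
--         curr_bit = n & 1
--         n = n >> 1
--
--         if curr_bit == 1:
--             curr_run += 1
--         else:
--             prev_run = curr_run
--             curr_run = 0
--
--         # check to update curr_max after each bit
--         curr_max = max(curr_max, prev_run+curr_run+1)
--
--     return curr_max
-- ===== SOURCE B (Python) =====
-- def flip_bit_to_win(n):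
--     # Collect (zeros_before_run, run_length) for each maximal run of ones,
--     # then compute the answer in a separate pass over the list.
--     pairs = []
--     gap = 0
--     run = 0
--     while n:
--         if n & 1:
--             run += 1
--         else:
--             if run:
--                 pairs.append((gap, run))
--                 run = 0
--                 gap = 0
--             gap += 1
--         n >>= 1
--     if run:
--         pairs.append((gap, run))
--     best = 1
--     prev = 0
--     for g, r in pairs:
--         best = max(best, r + 1)
--         if g == 1:
--             best = max(best, prev + r + 1)
--         prev = r
--     return best
-- ===== Notes on version B (the rewrite author's own statement) =====
-- stated objective: alternative
-- what changed: Instead of A's online prev/curr/max tracking, B first collects a list of (preceding-zero-gap, run-length) pairs for the maximal 1-runs of n and then computes the answer in a separate pass (max of run+1 and, where the gap is exactly one zero, prev+run+1).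
import Mathlib
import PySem

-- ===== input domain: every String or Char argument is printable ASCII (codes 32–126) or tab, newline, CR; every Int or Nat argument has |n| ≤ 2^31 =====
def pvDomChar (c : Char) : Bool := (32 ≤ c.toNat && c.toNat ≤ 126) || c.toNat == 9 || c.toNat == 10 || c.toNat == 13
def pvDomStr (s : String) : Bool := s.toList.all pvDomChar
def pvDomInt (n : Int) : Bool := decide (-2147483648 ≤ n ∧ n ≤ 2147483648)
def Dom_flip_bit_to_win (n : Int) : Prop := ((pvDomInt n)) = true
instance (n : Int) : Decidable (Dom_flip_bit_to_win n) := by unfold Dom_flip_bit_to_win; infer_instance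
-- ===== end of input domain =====

-- B replaces A's online prev/curr/max bit-scan by collecting (gap, run-length) pairs of the
-- 1-runs and computing the maximum in a separate pass (objective: alternative decomposition).


-- ===== PORT A =====
-- `while n:` loop; on Pre_ (0 ≤ n) `n & 1` is `n % 2` and `n >> 1` is `n / 2` (Int.ediv agrees
-- with Python's floor shift for nonnegative n).  For n < 0 the Python loop never terminates
-- (Pre_ excludes those inputs); the `n ≤ 0` guard only makes the Lean port total there.
def flipLoopA (n prev_run curr_run curr_max : Int) : Int :=
  if n ≤ 0 then curr_max
  else
    let curr_bit := n % 2
    let prev_run' := if curr_bit = 1 then prev_run else curr_run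
    let curr_run' := if curr_bit = 1 then curr_run + 1 else 0
    flipLoopA (n / 2) prev_run' curr_run' (max curr_max (prev_run' + curr_run' + 1))
termination_by n.toNat
decreasing_by omega

def flip_bit_to_win (n : Int) : Int :=
  flipLoopA n 0 0 1

-- ===== PORT B =====
-- B's while-loop: collect the (zeros-before-run, run-length) pairs of the maximal 1-runs
def collectB (n : Int) (pairs : List (Int × Int)) (gap run : Int) : List (Int × Int) × Int × Int :=
  if n ≤ 0 then (pairs, gap, run)
  else
    if n % 2 = 1 then collectB (n / 2) pairs gap (run + 1)
    else if 0 < run then collectB (n / 2) (pairs ++ [(gap, run)]) 1 0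
    else collectB (n / 2) pairs (gap + 1) run
termination_by n.toNat
decreasing_by all_goals omega

-- B's second pass: fold state = (best, prev run length)
def stepPost (s : Int × Int) (gr : Int × Int) : Int × Int :=
  let b1 := max s.1 (gr.2 + 1)
  (if gr.1 = 1 then max b1 (s.2 + gr.2 + 1) else b1, gr.2)

def flip_bit_to_win_alt (n : Int) : Int :=
  let c := collectB n [] 0 0
  let pairs := if 0 < c.2.2 then c.1 ++ [(c.2.1, c.2.2)] else c.1
  (pairs.foldl stepPost (1, 0)).1

-- ===== PRECONDITION & SPEC =====
-- Pre_ excludes n < 0, on which Python's `while n:` with `n >>= 1` never terminates.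
def Pre_flip_bit_to_win (n : Int) : Prop := 0 ≤ n
instance (n : Int) : Decidable (Pre_flip_bit_to_win n) := by unfold Pre_flip_bit_to_win; infer_instance
def pvWitness_flip_bit_to_win : Int := (1775)

def Spec_flip_bit_to_win (n : Int) (out : Int) : Prop := out = flip_bit_to_win_alt n
instance (n : Int) (out : Int) : Decidable (Spec_flip_bit_to_win n out) := by unfold Spec_flip_bit_to_win; infer_instance

-- ===== CLAIM (what is proved, stated in full; the proofs are below) =====
def Claim_equal_flip_bit_to_win : Prop := ∀ (n : Int), Dom_flip_bit_to_win n → Pre_flip_bit_to_win n → Spec_flip_bit_to_win n (flip_bit_to_win n)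

-- ===== LEMMAS AND PROOFS =====

-- B's trailing append + second pass, as one helper (proof-side only)
def postB (c : List (Int × Int) × Int × Int) : Int :=
  ((if 0 < c.2.2 then c.1 ++ [(c.2.1, c.2.2)] else c.1).foldl stepPost (1, 0)).1

theorem alt_eq_postB (n : Int) : flip_bit_to_win_alt n = postB (collectB n [] 0 0) := rfl

theorem foldPost_append (ps : List (Int × Int)) (s x) :
    (ps ++ [x]).foldl stepPost s = stepPost (ps.foldl stepPost s) x := by
  simp [List.foldl_append]

-- invariants of the second-pass fold
theorem stepPost_snd (s x : Int × Int) : (stepPost s x).2 = x.2 := by simp [stepPost]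

theorem stepPost_fst (s x : Int × Int) :
    (stepPost s x).1 = if x.1 = 1 then max (max s.1 (x.2 + 1)) (s.2 + x.2 + 1)
      else max s.1 (x.2 + 1) := by
  simp [stepPost]

theorem foldPost_facts (ps : List (Int × Int)) :
    ∀ s : Int × Int, (∀ x ∈ ps, 1 ≤ x.2) → 0 ≤ s.2 → s.2 + 1 ≤ s.1 →
      0 ≤ (ps.foldl stepPost s).2 ∧ (ps.foldl stepPost s).2 + 1 ≤ (ps.foldl stepPost s).1 := by
  induction ps with
  | nil => intro s _ h1 h2; exact ⟨h1, h2⟩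
  | cons x xs ih =>
    intro s hm h1 h2
    have hx : 1 ≤ x.2 := hm x (by simp)
    apply ih (stepPost s x) (fun y hy => hm y (by simp [hy]))
    · rw [stepPost_snd]; omega
    · rw [stepPost_snd, stepPost_fst]; split <;> omega

-- The main loop invariant: A's online state (p, run, m) corresponds to B's collected pairs.
theorem main_inv (N : ℕ) : ∀ n : Int, n.toNat = N → 0 ≤ n →
    ∀ (pairs : List (Int × Int)) (gap run p m : Int),
      0 ≤ run → 0 ≤ gap →
      (∀ x ∈ pairs, 1 ≤ x.2) →
      (gap = 0 → pairs = []) →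
      p = (if gap = 1 then (pairs.foldl stepPost (1, 0)).2 else 0) →
      m = max ((pairs.foldl stepPost (1, 0)).1) (p + run + 1) →
      flipLoopA n p run m = postB (collectB n pairs gap run) := by
  induction N using Nat.strong_induction_on with
  | _ N ih =>
    intro n hN hn pairs gap run p m hrun hgap hps hg0 hp hm
    obtain ⟨hb, hb1⟩ := foldPost_facts pairs (1, 0) hps (by norm_num) (by norm_num)
    by_cases h0 : n ≤ 0
    · -- n = 0: loop ends; compare m with B's post pass
      rw [flipLoopA, collectB]
      simp only [h0, if_pos]
      unfold postB
      by_cases hr : 0 < run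
      · simp only [hr, if_pos, foldPost_append]
        simp only [stepPost]
        by_cases hgap1 : gap = 1 <;> simp [hgap1] at hp ⊢ <;> omega
      · simp only [hr, if_neg, if_false]
        have : run = 0 := by omega
        subst this
        by_cases hgap1 : gap = 1 <;> simp [hgap1] at hp <;> omega
    · -- n > 0: one bit step
      have hpos : 0 < n := by omega
      have hlt : (n / 2).toNat < N := by omega
      have hn2 : 0 ≤ n / 2 := by omega
      rw [flipLoopA, collectB]
      simp only [h0, if_neg, if_false]
      by_cases hbit : n % 2 = 1
      · -- bit 1: extend current run
        simp only [hbit, if_pos]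
        exact ih _ hlt (n / 2) rfl hn2 pairs gap (run + 1) p _ (by omega) hgap hps hg0 hp
          (by omega)
      · -- bit 0
        have hb0 : n % 2 = 0 := by omega
        simp only [hbit, if_neg, if_false]
        by_cases hr : 0 < run
        · -- a run just ended: append it
          simp only [hr, if_pos]
          refine ih _ hlt (n / 2) rfl hn2 (pairs ++ [(gap, run)]) 1 0 run _ (by omega)
            (by omega) ?_ (by simp) ?_ ?_
          · intro x hx
            rcases List.mem_append.mp hx with h | h
            · exact hps x h
            · simp only [List.mem_singleton] at h; subst h; exact hr
          · simp [foldPost_append, stepPost]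
          · simp only [if_pos, foldPost_append, stepPost]
            by_cases hgap1 : gap = 1 <;> simp [hgap1] at hp ⊢ <;> omega
        · -- inside a gap of zeros
          simp only [hr, if_neg, if_false]
          have hrz : run = 0 := by omega
          subst hrz
          refine ih _ hlt (n / 2) rfl hn2 pairs (gap + 1) 0 0 _ le_rfl (by omega) hps
            (by omega) ?_ ?_
          · have : ¬ (gap + 1 = 1) ∨ pairs = [] := by
              by_cases h : gap = 0
              · exact Or.inr (hg0 h)
              · exact Or.inl (by omega)
            rcases this with h | h
            · simp [h]
            · simp [h, List.foldl]
          · by_cases hgap1 : gap = 1 <;> simp [hgap1] at hp <;> omega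

-- ===== VERDICT (by name: the statement is the Claim_ definition above) =====
theorem flip_bit_to_win_spec : Claim_equal_flip_bit_to_win := by
  intro n _ hpre
  unfold Spec_flip_bit_to_win flip_bit_to_win
  rw [alt_eq_postB]
  exact main_inv n.toNat n rfl hpre [] 0 0 0 1 le_rfl le_rfl (by simp) (fun _ => rfl)
    (by simp) (by simp)
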